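-- pv_equiv track=rewrite | github.com/nicetpad2/NICEGOLD-ProjectP | agent/deep_understanding/business_logic_analyzer.py | _categorize_strategy_function
-- ===== SOURCE A (Python) =====
-- def _categorize_strategy_function(func_name: str) -> str:
--     """Categorize strategy function by name."""
--     if any(keyword in func_name for keyword in ['signal', 'indicator']):
--         return 'signal_generation'
--     elif any(keyword in func_name for keyword in ['entry', 'buy']):
--         return 'entry_logic'
--     elif any(keyword in func_name for keyword in ['exit', 'sell']):
--         return 'exit_logic'
--     elif any(keyword in func_name for keyword in ['strategy', 'trade']):
--         return 'strategy_main'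
--     else:
--         return 'other'
-- ===== SOURCE B (Python) =====
-- _KEYWORD_RANK = {
--     'signal': 0, 'indicator': 0,
--     'entry': 1, 'buy': 1,
--     'exit': 2, 'sell': 2,
--     'strategy': 3, 'trade': 3,
-- }
--
-- _CATEGORIES = ['signal_generation', 'entry_logic', 'exit_logic', 'strategy_main', 'other']
--
--
-- def _categorize_strategy_function(func_name: str) -> str:
--     """Categorize by the best (lowest) priority rank of any keyword found."""
--     best = 4
--     for kw, rank in _KEYWORD_RANK.items():
--         if rank < best and kw in func_name:
--             best = rank
--     return _CATEGORIES[best]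
-- ===== Notes on version B (the rewrite author's own statement) =====
-- stated objective: alternative
-- what changed: Instead of a first-match if/elif cascade over keyword groups, B folds once over a keyword->priority-rank map keeping the minimum rank of any keyword present and indexes a category array with it; correct because the first matching branch in A is exactly the branch of minimal rank among all matching keywords.
import Mathlib
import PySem

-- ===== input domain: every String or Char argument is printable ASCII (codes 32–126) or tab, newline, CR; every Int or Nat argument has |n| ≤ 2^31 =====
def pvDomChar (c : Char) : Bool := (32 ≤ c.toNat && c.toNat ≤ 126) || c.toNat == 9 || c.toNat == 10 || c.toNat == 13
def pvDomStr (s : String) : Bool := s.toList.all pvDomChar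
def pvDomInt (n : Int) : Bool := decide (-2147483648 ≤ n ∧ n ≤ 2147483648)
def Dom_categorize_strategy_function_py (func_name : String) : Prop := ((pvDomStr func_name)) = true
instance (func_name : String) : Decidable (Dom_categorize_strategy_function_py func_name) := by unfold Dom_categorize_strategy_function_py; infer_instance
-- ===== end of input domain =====

-- B replaces A's if/elif cascade by a min-rank fold over a keyword->rank map, indexing a category array (objective: alternative).


-- ===== PORT A =====
-- Port of A: the if/elif cascade, each branch testing any(keyword in func_name for keyword in [...]).
def categorize_strategy_function_py (func_name : String) : String :=
  if ["signal", "indicator"].any (fun k => PySem.Str.isIn k func_name) then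
    "signal_generation"
  else if ["entry", "buy"].any (fun k => PySem.Str.isIn k func_name) then
    "entry_logic"
  else if ["exit", "sell"].any (fun k => PySem.Str.isIn k func_name) then
    "exit_logic"
  else if ["strategy", "trade"].any (fun k => PySem.Str.isIn k func_name) then
    "strategy_main"
  else
    "other"

-- ===== PORT B =====
-- Port of B: fold over the keyword->rank items keeping the minimum rank of any keyword found,
-- then index the category array with it.
def pvKeywordRank : List (String × Nat) :=
  [("signal", 0), ("indicator", 0), ("entry", 1), ("buy", 1),
   ("exit", 2), ("sell", 2), ("strategy", 3), ("trade", 3)]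

def pvCategories : List String :=
  ["signal_generation", "entry_logic", "exit_logic", "strategy_main", "other"]

def categorize_strategy_function_py_alt (func_name : String) : String :=
  let best := pvKeywordRank.foldl
    (fun best p => if p.2 < best && PySem.Str.isIn p.1 func_name then p.2 else best) 4
  pvCategories.getD best "other"

-- ===== PRECONDITION & SPEC =====
def Spec_categorize_strategy_function_py (func_name : String) (out : String) : Prop := out = categorize_strategy_function_py_alt func_name
instance (func_name : String) (out : String) : Decidable (Spec_categorize_strategy_function_py func_name out) := by unfold Spec_categorize_strategy_function_py; infer_instance

-- ===== CLAIM (what is proved, stated in full; the proofs are below) =====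
def Claim_equal_categorize_strategy_function_py : Prop := ∀ (func_name : String), Dom_categorize_strategy_function_py func_name → Spec_categorize_strategy_function_py func_name (categorize_strategy_function_py func_name)

-- ===== LEMMAS AND PROOFS =====

-- ===== VERDICT (by name: the statement is the Claim_ definition above) =====
-- Generic form of the equality over the eight membership booleans.
theorem pv_cascade_eq_minrank (b1 b2 b3 b4 b5 b6 b7 b8 : Bool) :
    (if b1 || (b2 || false) then "signal_generation"
     else if b3 || (b4 || false) then "entry_logic"
     else if b5 || (b6 || false) then "exit_logic"
     else if b7 || (b8 || false) then "strategy_main"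
     else "other")
    = (["signal_generation", "entry_logic", "exit_logic", "strategy_main", "other"].getD
        ([(b1, 0), (b2, 0), (b3, 1), (b4, 1), (b5, 2), (b6, 2), (b7, 3), (b8, 3)].foldl
          (fun best p => if p.2 < best && p.1 then p.2 else best) 4)
        "other") := by
  revert b1 b2 b3 b4 b5 b6 b7 b8
  decide

theorem categorize_strategy_function_py_spec : Claim_equal_categorize_strategy_function_py := by
  intro func_name _
  exact pv_cascade_eq_minrank
    (PySem.Str.isIn "signal" func_name) (PySem.Str.isIn "indicator" func_name)
    (PySem.Str.isIn "entry" func_name) (PySem.Str.isIn "buy" func_name)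
    (PySem.Str.isIn "exit" func_name) (PySem.Str.isIn "sell" func_name)
    (PySem.Str.isIn "strategy" func_name) (PySem.Str.isIn "trade" func_name)
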